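-- pv_equiv track=rewrite | github.com/open-io/oio-sds | oio/common/kafka.py | kafka_options_from_conf
-- ===== SOURCE A (Python) =====
-- KAFKA_CONF_COMMON_PREFIX = "kafka_common_"
--
-- KAFKA_CONF_CONSUMER_PREFIX = "kafka_consumer_"
--
-- KAFKA_CONF_PRODUCER_PREFIX = "kafka_producer_"
--
-- def kafka_options_from_conf(app_conf):
--     """Retrieve kafka option from app configuration"""
--     kafka_conf = {}
--
--     for key, value in app_conf.items():
--         for prefix in (
--             KAFKA_CONF_COMMON_PREFIX,
--             KAFKA_CONF_CONSUMER_PREFIX,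
--             KAFKA_CONF_PRODUCER_PREFIX,
--         ):
--             if key.startswith(prefix):
--                 prefix_conf = kafka_conf.setdefault(prefix, {})
--                 key = key[len(prefix) :]
--                 prefix_conf[key] = value
--                 break
--
--     # Reduce confs
--     consumer_conf = {
--         **(kafka_conf.get(KAFKA_CONF_COMMON_PREFIX, {})),
--         **(kafka_conf.get(KAFKA_CONF_CONSUMER_PREFIX, {})),
--     }
--
--     producer_conf = {
--         **(kafka_conf.get(KAFKA_CONF_COMMON_PREFIX, {})),
--         **(kafka_conf.get(KAFKA_CONF_PRODUCER_PREFIX, {})),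
--     }
--
--     return consumer_conf, producer_conf
-- ===== SOURCE B (Python) =====
-- KAFKA_CONF_COMMON_PREFIX = "kafka_common_"
--
-- KAFKA_CONF_CONSUMER_PREFIX = "kafka_consumer_"
--
-- KAFKA_CONF_PRODUCER_PREFIX = "kafka_producer_"
--
--
-- def kafka_options_from_conf(app_conf):
--     """Retrieve kafka option from app configuration"""
--     consumer_conf = {}
--     producer_conf = {}
--     # pass 1: common options go into both confs
--     for key, value in app_conf.items():
--         if key.startswith(KAFKA_CONF_COMMON_PREFIX):
--             stripped = key[len(KAFKA_CONF_COMMON_PREFIX):]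
--             consumer_conf[stripped] = value
--             producer_conf[stripped] = value
--     # pass 2: specific options override common ones
--     for key, value in app_conf.items():
--         if key.startswith(KAFKA_CONF_CONSUMER_PREFIX):
--             consumer_conf[key[len(KAFKA_CONF_CONSUMER_PREFIX):]] = value
--         elif key.startswith(KAFKA_CONF_PRODUCER_PREFIX):
--             producer_conf[key[len(KAFKA_CONF_PRODUCER_PREFIX):]] = value
--     return consumer_conf, producer_conf
-- ===== Notes on version B (the rewrite author's own statement) =====
-- stated objective: simpler
-- what changed: Drops A's intermediate prefix-indexed dict-of-dicts and the final {**common, **specific} merges; B builds consumer_conf and producer_conf directly in two passes over the items (common keys written to both first, then specific keys overwriting).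
import Mathlib
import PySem

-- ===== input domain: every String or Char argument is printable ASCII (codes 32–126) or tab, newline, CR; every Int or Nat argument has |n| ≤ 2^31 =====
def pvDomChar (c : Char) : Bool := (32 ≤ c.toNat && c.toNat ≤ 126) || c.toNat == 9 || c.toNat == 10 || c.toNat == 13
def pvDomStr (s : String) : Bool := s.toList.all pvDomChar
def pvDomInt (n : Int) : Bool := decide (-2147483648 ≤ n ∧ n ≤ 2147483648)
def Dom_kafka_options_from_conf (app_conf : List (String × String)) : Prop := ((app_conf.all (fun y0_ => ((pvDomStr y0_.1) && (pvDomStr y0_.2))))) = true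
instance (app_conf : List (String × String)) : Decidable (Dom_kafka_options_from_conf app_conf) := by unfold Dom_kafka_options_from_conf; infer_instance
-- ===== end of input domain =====

-- B replaces A's intermediate prefix-indexed dict-of-dicts and the final {**common, **specific}
-- merges by two direct passes over the items, building consumer_conf and producer_conf in place
-- (objective: simpler).

def pvCommonPfx : String := "kafka_common_"
def pvConsumerPfx : String := "kafka_consumer_"
def pvProducerPfx : String := "kafka_producer_"

-- key[len(prefix):]
def pvStrip (p s : String) : String := PySem.Str.slice s (some (PySem.Str.len p)) none

-- ===== PORT A =====
-- the body of A's loop: try the three prefixes in order, first match wins (the 'break')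
def pvStepA (kc : PySem.Dict String (PySem.Dict String String)) (kv : String × String) :
    PySem.Dict String (PySem.Dict String String) :=
  if PySem.Str.startswith kv.1 pvCommonPfx then
    let kc' := kc.setdefault pvCommonPfx PySem.Dict.empty
    kc'.insert pvCommonPfx ((kc'.getD pvCommonPfx PySem.Dict.empty).insert (pvStrip pvCommonPfx kv.1) kv.2)
  else if PySem.Str.startswith kv.1 pvConsumerPfx then
    let kc' := kc.setdefault pvConsumerPfx PySem.Dict.empty
    kc'.insert pvConsumerPfx ((kc'.getD pvConsumerPfx PySem.Dict.empty).insert (pvStrip pvConsumerPfx kv.1) kv.2)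
  else if PySem.Str.startswith kv.1 pvProducerPfx then
    let kc' := kc.setdefault pvProducerPfx PySem.Dict.empty
    kc'.insert pvProducerPfx ((kc'.getD pvProducerPfx PySem.Dict.empty).insert (pvStrip pvProducerPfx kv.1) kv.2)
  else kc

def kafka_options_from_conf (app_conf : List (String × String)) :
    (List (String × String)) × (List (String × String)) :=
  let kafka_conf := app_conf.foldl pvStepA PySem.Dict.empty
  -- {**common, **specific}: a fresh dict filled with common's items then specific's items
  let consumer_conf := PySem.Dict.update (kafka_conf.getD pvCommonPfx PySem.Dict.empty)
    (kafka_conf.getD pvConsumerPfx PySem.Dict.empty).items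
  let producer_conf := PySem.Dict.update (kafka_conf.getD pvCommonPfx PySem.Dict.empty)
    (kafka_conf.getD pvProducerPfx PySem.Dict.empty).items
  (consumer_conf.items, producer_conf.items)

-- ===== PORT B =====
-- pass 1: common options go into both confs
def pvStepB1 (st : PySem.Dict String String × PySem.Dict String String) (kv : String × String) :
    PySem.Dict String String × PySem.Dict String String :=
  if PySem.Str.startswith kv.1 pvCommonPfx then
    (st.1.insert (pvStrip pvCommonPfx kv.1) kv.2, st.2.insert (pvStrip pvCommonPfx kv.1) kv.2)
  else st

-- pass 2: specific options override common ones
def pvStepB2 (st : PySem.Dict String String × PySem.Dict String String) (kv : String × String) :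
    PySem.Dict String String × PySem.Dict String String :=
  if PySem.Str.startswith kv.1 pvConsumerPfx then
    (st.1.insert (pvStrip pvConsumerPfx kv.1) kv.2, st.2)
  else if PySem.Str.startswith kv.1 pvProducerPfx then
    (st.1, st.2.insert (pvStrip pvProducerPfx kv.1) kv.2)
  else st

def kafka_options_from_conf_alt (app_conf : List (String × String)) :
    (List (String × String)) × (List (String × String)) :=
  let st1 := app_conf.foldl pvStepB1 (PySem.Dict.empty, PySem.Dict.empty)
  let st2 := app_conf.foldl pvStepB2 st1
  (st2.1.items, st2.2.items)

-- ===== PRECONDITION & SPEC =====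
def Spec_kafka_options_from_conf (app_conf : List (String × String)) (out : (List (String × String)) × (List (String × String))) : Prop := out = kafka_options_from_conf_alt app_conf
instance (app_conf : List (String × String)) (out : (List (String × String)) × (List (String × String))) : Decidable (Spec_kafka_options_from_conf app_conf out) := by unfold Spec_kafka_options_from_conf; infer_instance

-- ===== CLAIM (what is proved, stated in full; the proofs are below) =====
def Claim_equal_kafka_options_from_conf : Prop := ∀ (app_conf : List (String × String)), Dom_kafka_options_from_conf app_conf → Spec_kafka_options_from_conf app_conf (kafka_options_from_conf app_conf)

-- ===== LEMMAS AND PROOFS =====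

-- the single-prefix filtering fold both sides reduce to
def pvFilt (P : String) (e : PySem.Dict String String) (l : List (String × String)) :
    PySem.Dict String String :=
  l.foldl (fun e kv => if PySem.Str.startswith kv.1 P then e.insert (pvStrip P kv.1) kv.2 else e) e

lemma pvFilt_cons (P : String) (e : PySem.Dict String String) (kv : String × String)
    (t : List (String × String)) :
    pvFilt P e (kv :: t)
      = pvFilt P (if PySem.Str.startswith kv.1 P then e.insert (pvStrip P kv.1) kv.2 else e) t := rfl

def pvIsPfx (P : String) : Prop := P = pvCommonPfx ∨ P = pvConsumerPfx ∨ P = pvProducerPfx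

-- no key starts with two distinct kafka prefixes (none is a prefix of another)
lemma pv_excl {P Q : String} (hP : pvIsPfx P) (hQ : pvIsPfx Q) (hne : P ≠ Q) (s : String)
    (h : PySem.Str.startswith s Q = true) : PySem.Str.startswith s P = false := by
  by_contra hc
  rw [Bool.not_eq_false] at hc
  rw [PySem.Str.startswith_eq, PySem.Chars.startswith_iff] at h hc
  have hor := List.prefix_or_prefix_of_prefix hc h
  rcases hP with rfl | rfl | rfl <;> rcases hQ with rfl | rfl | rfl <;>
    first
      | exact hne rfl
      | exact absurd hor (by decide)

lemma pv_getD_setdefault_of_ne (d : PySem.Dict String (PySem.Dict String String))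
    (k k' : String) (v d0 : PySem.Dict String String) (hne : k' ≠ k) :
    (d.setdefault k v).getD k' d0 = d.getD k' d0 := by
  rw [PySem.Dict.getD_eq_get?_getD, PySem.Dict.get?_setdefault_of_ne d v hne,
    ← PySem.Dict.getD_eq_get?_getD]

-- A's fold, projected at one prefix, is the filtering fold for that prefix
lemma pvA_getD {P : String} (hP : pvIsPfx P) :
    ∀ (l : List (String × String)) (kc : PySem.Dict String (PySem.Dict String String)),
      (l.foldl pvStepA kc).getD P PySem.Dict.empty = pvFilt P (kc.getD P PySem.Dict.empty) l := by
  intro l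
  induction l with
  | nil => intro kc; rfl
  | cons kv t ih =>
    intro kc
    rw [List.foldl_cons, ih, pvFilt_cons]
    congr 1
    unfold pvStepA
    by_cases h1 : PySem.Chars.startswith kv.1.toList pvCommonPfx.toList = true
    · have h1s : PySem.Str.startswith kv.1 pvCommonPfx = true := by
        simp only [PySem.Str.startswith_eq]; exact h1
      by_cases hPQ : P = pvCommonPfx
      · subst hPQ
        simp [h1, PySem.Dict.getD_setdefault_self]
      · have hc : PySem.Chars.startswith kv.1.toList P.toList = false := by
          have := pv_excl hP (Or.inl rfl) hPQ kv.1 h1s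
          simpa using this
        simp [h1, hc, PySem.Dict.getD_insert, hPQ, pv_getD_setdefault_of_ne _ _ _ _ _ hPQ]
    · by_cases h2 : PySem.Chars.startswith kv.1.toList pvConsumerPfx.toList = true
      · have h2s : PySem.Str.startswith kv.1 pvConsumerPfx = true := by
          simp only [PySem.Str.startswith_eq]; exact h2
        by_cases hPQ : P = pvConsumerPfx
        · subst hPQ
          simp [h1, h2, PySem.Dict.getD_setdefault_self]
        · have hc : PySem.Chars.startswith kv.1.toList P.toList = false := by
            have := pv_excl hP (Or.inr (Or.inl rfl)) hPQ kv.1 h2s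
            simpa using this
          simp [h1, h2, hc, PySem.Dict.getD_insert, hPQ, pv_getD_setdefault_of_ne _ _ _ _ _ hPQ]
      · by_cases h3 : PySem.Chars.startswith kv.1.toList pvProducerPfx.toList = true
        · have h3s : PySem.Str.startswith kv.1 pvProducerPfx = true := by
            simp only [PySem.Str.startswith_eq]; exact h3
          by_cases hPQ : P = pvProducerPfx
          · subst hPQ
            simp [h1, h2, h3, PySem.Dict.getD_setdefault_self]
          · have hc : PySem.Chars.startswith kv.1.toList P.toList = false := by
              have := pv_excl hP (Or.inr (Or.inr rfl)) hPQ kv.1 h3s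
              simpa using this
            simp [h1, h2, h3, hc, PySem.Dict.getD_insert, hPQ,
              pv_getD_setdefault_of_ne _ _ _ _ _ hPQ]
        · have hc : PySem.Chars.startswith kv.1.toList P.toList = false := by
            rcases hP with rfl | rfl | rfl <;> simp_all
          simp [h1, h2, h3, hc]

-- B's pair folds split componentwise
lemma pvB1_split (l : List (String × String)) :
    ∀ (c p : PySem.Dict String String),
      l.foldl pvStepB1 (c, p) = (pvFilt pvCommonPfx c l, pvFilt pvCommonPfx p l) := by
  induction l with
  | nil => intro c p; rfl
  | cons kv t ih =>
    intro c p
    rw [List.foldl_cons, pvFilt_cons, pvFilt_cons]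
    by_cases h : PySem.Str.startswith kv.1 pvCommonPfx = true
    · rw [if_pos h, if_pos h,
        show pvStepB1 (c, p) kv = (c.insert (pvStrip pvCommonPfx kv.1) kv.2,
          p.insert (pvStrip pvCommonPfx kv.1) kv.2) from by unfold pvStepB1; rw [if_pos h],
        ih]
    · rw [if_neg h, if_neg h,
        show pvStepB1 (c, p) kv = (c, p) from by unfold pvStepB1; rw [if_neg h],
        ih]

lemma pvB2_split (l : List (String × String)) :
    ∀ (c p : PySem.Dict String String),
      l.foldl pvStepB2 (c, p) = (pvFilt pvConsumerPfx c l, pvFilt pvProducerPfx p l) := by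
  induction l with
  | nil => intro c p; rfl
  | cons kv t ih =>
    intro c p
    rw [List.foldl_cons, pvFilt_cons, pvFilt_cons]
    by_cases h2 : PySem.Str.startswith kv.1 pvConsumerPfx = true
    · have h3 := pv_excl (Or.inr (Or.inr rfl)) (Or.inr (Or.inl rfl)) (by decide) kv.1 h2
      rw [if_pos h2, if_neg (by rw [h3]; exact Bool.false_ne_true),
        show pvStepB2 (c, p) kv = (c.insert (pvStrip pvConsumerPfx kv.1) kv.2, p) from by
          unfold pvStepB2; rw [if_pos h2],
        ih]
    · by_cases h3 : PySem.Str.startswith kv.1 pvProducerPfx = true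
      · rw [if_neg h2, if_pos h3,
          show pvStepB2 (c, p) kv = (c, p.insert (pvStrip pvProducerPfx kv.1) kv.2) from by
            unfold pvStepB2; rw [if_neg h2, if_pos h3],
          ih]
      · rw [if_neg h2, if_neg h3,
          show pvStepB2 (c, p) kv = (c, p) from by
            unfold pvStepB2; rw [if_neg h2, if_neg h3],
          ih]

-- inserting at a key already present commutes with inserting at a different key
lemma pv_insert_comm (d : PySem.Dict String String) {k : String} (v : String)
    {q1 : String} (q2 : String) (hk : d.contains k = true) (hne : q1 ≠ k) :
    (d.insert q1 q2).insert k v = (d.insert k v).insert q1 q2 := by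
  have hk' : (d.insert q1 q2).contains k = true := by
    rw [PySem.Dict.contains_insert]; simp [hk]
  have hk'' : (d.insert k v).contains q1 = d.contains q1 := by
    rw [PySem.Dict.contains_insert]; simp [hne]
  apply PySem.Dict.ext
  by_cases hq : d.contains q1 = true
  · rw [PySem.Dict.items_insert_of_contains _ _ hk',
      PySem.Dict.items_insert_of_contains _ _ hq,
      PySem.Dict.items_insert_of_contains _ _ (by rw [hk'']; exact hq),
      PySem.Dict.items_insert_of_contains _ _ hk]
    rw [List.map_map, List.map_map]
    apply List.map_congr_left
    intro p _
    by_cases hp1 : p.1 = q1 <;> by_cases hp2 : p.1 = k <;>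
      simp_all [Function.comp, Ne.symm hne]
  · rw [Bool.not_eq_true] at hq
    rw [PySem.Dict.items_insert_of_contains _ _ hk',
      PySem.Dict.items_insert_of_not_contains _ _ hq,
      PySem.Dict.items_insert_of_not_contains _ _ (by rw [hk'']; exact hq),
      PySem.Dict.items_insert_of_contains _ _ hk]
    rw [List.map_append]
    simp [hne]

-- a trailing overwrite of a present key, no remaining key equal to it, moves to the front
lemma pv_insert_through (k v : String) :
    ∀ (t : List (String × String)) (d : PySem.Dict String String),
      d.contains k = true → (∀ p ∈ t, p.1 ≠ k) →
      (t.foldl (fun a p => a.insert p.1 p.2) d).insert k v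
        = t.foldl (fun a p => a.insert p.1 p.2) (d.insert k v) := by
  intro t
  induction t with
  | nil => intro d _ _; rfl
  | cons q t ih =>
    intro d hk hne
    simp only [List.foldl_cons]
    have hq : q.1 ≠ k := hne q (List.mem_cons_self ..)
    rw [ih (d.insert q.1 q.2) (by rw [PySem.Dict.contains_insert]; simp [hk])
        (fun p hp => hne p (List.mem_cons_of_mem _ hp)),
      pv_insert_comm d v q.2 hk hq]

-- folding the in-place-overwritten items of a dict = folding the items, then overwriting
lemma pv_fold_replace (k v : String) :
    ∀ (l : List (String × String)) (d : PySem.Dict String String),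
      (l.map Prod.fst).Nodup → k ∈ l.map Prod.fst →
      (l.map (fun p => if p.1 == k then (k, v) else p)).foldl (fun a p => a.insert p.1 p.2) d
        = (l.foldl (fun a p => a.insert p.1 p.2) d).insert k v := by
  intro l
  induction l with
  | nil =>
    intro d _ hmem; simp at hmem
  | cons q t ih =>
    obtain ⟨q1, q2⟩ := q
    intro d hnd hmem
    rw [List.map_cons] at hnd hmem
    have hnd1 := (List.nodup_cons.mp hnd).1
    have hnd2 := (List.nodup_cons.mp hnd).2
    by_cases hq : q1 = k
    · subst hq
      have hnotin : ∀ p ∈ t, p.1 ≠ q1 := by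
        intro p hp hpk
        exact hnd1 (hpk ▸ List.mem_map.mpr ⟨p, hp, rfl⟩)
      have hmap : t.map (fun p => if p.1 == q1 then (q1, v) else p) = t := by
        have hcg := List.map_congr_left (l := t)
          (f := fun p => if p.1 == q1 then (q1, v) else p) (g := id)
          (fun p hp => by simp [hnotin p hp])
        simpa using hcg
      rw [List.map_cons, List.foldl_cons, List.foldl_cons,
        show (if (q1, q2).1 == q1 then (q1, v) else (q1, q2)) = (q1, v) from by simp, hmap]
      rw [pv_insert_through q1 v t (d.insert (q1, q2).1 (q1, q2).2)
          (by rw [PySem.Dict.contains_insert]; simp) hnotin,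
        PySem.Dict.insert_insert_self]
    · have hq' : ((q1, q2).1 == k) = false := by simp [hq]
      rw [List.map_cons, List.foldl_cons, List.foldl_cons,
        show (if (q1, q2).1 == k then (k, v) else (q1, q2)) = (q1, q2) from by rw [hq']; rfl]
      have hmem' : k ∈ t.map Prod.fst := by
        rcases List.mem_cons.mp hmem with h | h
        · exact absurd h.symm hq
        · exact h
      exact ih (d.insert (q1, q2).1 (q1, q2).2) hnd2 hmem'

-- folding the items of (e.insert k v) = folding e's items, then inserting (k, v)
lemma pv_update_insert (d e : PySem.Dict String String) (k v : String)
    (hnd : e.keys.Nodup) :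
    PySem.Dict.update d (e.insert k v).items = (PySem.Dict.update d e.items).insert k v := by
  by_cases h : e.contains k = true
  · rw [PySem.Dict.update, PySem.Dict.update,
      PySem.Dict.items_insert_of_contains _ _ h]
    exact pv_fold_replace k v e.items d hnd ((PySem.Dict.contains_iff_mem_keys e k).mp h)
  · rw [Bool.not_eq_true] at h
    rw [PySem.Dict.update, PySem.Dict.update,
      PySem.Dict.items_insert_of_not_contains _ _ h, List.foldl_append]
    rfl

-- merging the result of a filtering fold = running the filtering fold on the base dict
lemma pv_update_filt (P : String) (l : List (String × String)) :
    ∀ (d e : PySem.Dict String String), e.keys.Nodup →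
      PySem.Dict.update d (pvFilt P e l).items = pvFilt P (PySem.Dict.update d e.items) l := by
  induction l with
  | nil => intro d e _; rfl
  | cons kv t ih =>
    intro d e hnd
    rw [pvFilt_cons, pvFilt_cons]
    by_cases h : PySem.Str.startswith kv.1 P = true
    · rw [if_pos h, if_pos h, ih d _ (PySem.Dict.nodup_keys_insert e _ _ hnd),
        pv_update_insert d e _ _ hnd]
    · rw [if_neg h, if_neg h]
      exact ih d e hnd

-- ===== VERDICT (by name: the statement is the Claim_ definition above) =====
theorem kafka_options_from_conf_spec : Claim_equal_kafka_options_from_conf := by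
  intro app_conf _
  unfold Spec_kafka_options_from_conf kafka_options_from_conf kafka_options_from_conf_alt
  simp only [pvB1_split, pvB2_split]
  have hC := pvA_getD (Or.inl rfl) app_conf PySem.Dict.empty
  have hCo := pvA_getD (Or.inr (Or.inl rfl)) app_conf PySem.Dict.empty
  have hP := pvA_getD (Or.inr (Or.inr rfl)) app_conf PySem.Dict.empty
  simp only [PySem.Dict.getD_empty] at hC hCo hP
  rw [hC, hCo, hP,
    pv_update_filt pvConsumerPfx app_conf _ PySem.Dict.empty PySem.Dict.nodup_keys_empty,
    pv_update_filt pvProducerPfx app_conf _ PySem.Dict.empty PySem.Dict.nodup_keys_empty]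
  rfl
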